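-- pv_equiv track=rewrite | github.com/VerbalAid/Medical_Justifications_Human_vs_LLM_-Corpus_Linguistics- | pipeline/snomed_taxonomy_compare.py | shortest_path_up
-- ===== SOURCE A (Python) =====
-- def shortest_path_up(
--     start: str,
--     goal: str,
--     parents: dict[str, list[str]],
--     max_len: int = 48,
-- ) -> list[str] | None:
--     from collections import deque
--
--     q: deque[tuple[str, list[str]]] = deque([(start, [start])])
--     seen = {start}
--     while q:
--         node, path = q.popleft()
--         if node == goal:
--             return path
--         if len(path) > max_len:
--             continue
--         for p in parents.get(node, []):
--             if p in seen:
--                 continue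
--             seen.add(p)
--             npath = path + [p]
--             if p == goal:
--                 return npath
--             q.append((p, npath))
--     return None
-- ===== SOURCE B (Python) =====
-- def _reconstruct(came_from, node):
--     path = []
--     while node is not None:
--         path.append(node)
--         node = came_from[node]
--     path.reverse()
--     return path
--
--
-- def shortest_path_up(
--     start: str,
--     goal: str,
--     parents: dict[str, list[str]],
--     max_len: int = 48,
-- ) -> list[str] | None:
--     from collections import deque
--
--     q: deque[str] = deque([start])
--     came_from: dict[str, str | None] = {start: None}
--     depth: dict[str, int] = {start: 1}
--     while q:
--         node = q.popleft()
--         if node == goal: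
--             return _reconstruct(came_from, node)
--         if depth[node] > max_len:
--             continue
--         for p in parents.get(node, []):
--             if p in came_from:
--                 continue
--             came_from[p] = node
--             depth[p] = depth[node] + 1
--             if p == goal:
--                 return _reconstruct(came_from, p)
--             q.append(p)
--     return None
-- ===== Notes on version B (the rewrite author's own statement) =====
-- stated objective: alternative
-- what changed: The queue no longer carries a full copy of the path to each node: B runs BFS over bare nodes with a came_from parent-pointer dict and a depth dict for the max_len cutoff, reconstructing the single answer path once at the end, instead of A's queue of (node, path) pairs that copies an O(L) path list at every enqueue.
import Mathlib
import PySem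

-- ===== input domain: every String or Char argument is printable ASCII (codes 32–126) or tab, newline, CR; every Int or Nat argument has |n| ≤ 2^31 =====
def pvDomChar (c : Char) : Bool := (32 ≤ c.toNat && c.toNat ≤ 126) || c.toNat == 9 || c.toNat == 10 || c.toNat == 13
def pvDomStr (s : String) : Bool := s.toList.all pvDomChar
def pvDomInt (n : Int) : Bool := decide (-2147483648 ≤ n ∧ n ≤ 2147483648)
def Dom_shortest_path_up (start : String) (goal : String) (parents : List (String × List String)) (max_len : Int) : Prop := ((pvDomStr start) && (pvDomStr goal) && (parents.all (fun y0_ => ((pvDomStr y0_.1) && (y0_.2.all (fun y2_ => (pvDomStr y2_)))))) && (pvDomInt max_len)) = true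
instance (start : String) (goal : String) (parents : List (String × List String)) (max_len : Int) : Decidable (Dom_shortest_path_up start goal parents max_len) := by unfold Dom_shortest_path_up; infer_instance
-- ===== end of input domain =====

-- B replaces A's BFS queue of (node, full-path-copy) pairs by a queue of bare nodes with a
-- came_from parent-pointer dict and a depth dict, reconstructing the one answer path at the
-- end (alternative data-structure choice; same observable behaviour).

-- ===== PORT A =====
-- inner 'for p in parents.get(node, [])' loop: returns .inr path on the early 'return npath',
-- otherwise .inl (updated seen, entries appended to the queue)
def pvExpandA (goal : String) (ps : List String) (seen : PySem.Set String) (path : List String)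
    (acc : List (String × List String)) :
    (PySem.Set String × List (String × List String)) ⊕ List String :=
  match ps with
  | [] => .inl (seen, acc)
  | p :: rest =>
    if PySem.Set.contains seen p then pvExpandA goal rest seen path acc
    else
      let seen' := PySem.Set.add seen p
      let npath := path ++ [p]
      if p = goal then .inr npath
      else pvExpandA goal rest seen' path (acc ++ [(p, npath)])

-- the 'while q' loop, fuelled (the fuel passed at the call site always suffices: every
-- enqueue after the first adds a fresh element of some parents list to 'seen')
def pvLoopA (goal : String) (parents : PySem.Dict String (List String)) (max_len : Int) :
    Nat → List (String × List String) → PySem.Set String → Option (List String)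
  | _, [], _ => none
  | 0, _ :: _, _ => none
  | fuel + 1, (node, path) :: q, seen =>
    if node = goal then some path
    else if (path.length : Int) > max_len then pvLoopA goal parents max_len fuel q seen
    else
      match pvExpandA goal (parents.getD node []) seen path [] with
      | .inr r => some r
      | .inl (seen', newq) => pvLoopA goal parents max_len fuel (q ++ newq) seen'

def shortest_path_up (start : String) (goal : String) (parents : List (String × List String)) (max_len : Int) : Option (List String) :=
  pvLoopA goal (PySem.Dict.mk parents) max_len
    (1 + (parents.flatMap Prod.snd).length)
    [(start, [start])] (PySem.Set.ofList [start])

-- ===== PORT B =====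
-- _reconstruct: 'while node is not None' walk up the came_from chain, fuelled (chain length
-- is at most the number of keys), then reversed
def pvRecon (came : PySem.Dict String (Option String)) :
    Nat → Option String → List String → List String
  | _, none, acc => acc.reverse
  | 0, some _, acc => acc.reverse
  | fuel + 1, some n, acc => pvRecon came fuel (came.getD n none) (acc ++ [n])

def pvReconstruct (came : PySem.Dict String (Option String)) (node : String) : List String :=
  pvRecon came (came.size + 1) (some node) []

-- inner 'for p in parents.get(node, [])' loop of B
def pvExpandB (goal : String) (ps : List String) (came : PySem.Dict String (Option String))
    (depth : PySem.Dict String Int) (node : String) (acc : List String) :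
    (PySem.Dict String (Option String) × PySem.Dict String Int × List String) ⊕ List String :=
  match ps with
  | [] => .inl (came, depth, acc)
  | p :: rest =>
    if came.contains p then pvExpandB goal rest came depth node acc
    else
      let came' := came.insert p (some node)
      let depth' := depth.insert p (depth.getD node 0 + 1)
      if p = goal then .inr (pvReconstruct came' p)
      else pvExpandB goal rest came' depth' node (acc ++ [p])

def pvLoopB (goal : String) (parents : PySem.Dict String (List String)) (max_len : Int) :
    Nat → List String → PySem.Dict String (Option String) → PySem.Dict String Int →
    Option (List String)
  | _, [], _, _ => none
  | 0, _ :: _, _, _ => none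
  | fuel + 1, node :: q, came, depth =>
    if node = goal then some (pvReconstruct came node)
    else if depth.getD node 0 > max_len then pvLoopB goal parents max_len fuel q came depth
    else
      match pvExpandB goal (parents.getD node []) came depth node [] with
      | .inr r => some r
      | .inl (came', depth', newq) => pvLoopB goal parents max_len fuel (q ++ newq) came' depth'

def shortest_path_up_alt (start : String) (goal : String) (parents : List (String × List String)) (max_len : Int) : Option (List String) :=
  pvLoopB goal (PySem.Dict.mk parents) max_len
    (1 + (parents.flatMap Prod.snd).length)
    [start] (PySem.Dict.empty.insert start none) (PySem.Dict.empty.insert start 1)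

-- ===== PRECONDITION & SPEC =====
def Spec_shortest_path_up (start : String) (goal : String) (parents : List (String × List String)) (max_len : Int) (out : Option (List String)) : Prop := out = shortest_path_up_alt start goal parents max_len
instance (start : String) (goal : String) (parents : List (String × List String)) (max_len : Int) (out : Option (List String)) : Decidable (Spec_shortest_path_up start goal parents max_len out) := by unfold Spec_shortest_path_up; infer_instance

-- ===== CLAIM (what is proved, stated in full; the proofs are below) =====
def Claim_equal_shortest_path_up : Prop := ∀ (start : String) (goal : String) (parents : List (String × List String)) (max_len : Int), Dom_shortest_path_up start goal parents max_len → Spec_shortest_path_up start goal parents max_len (shortest_path_up start goal parents max_len)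

-- ===== LEMMAS AND PROOFS =====

-- path recorded in came_from: PvChain came n p means walking parent pointers up from n
-- yields the (forward-ordered) path p
inductive PvChain (came : PySem.Dict String (Option String)) : String → List String → Prop
  | base {n : String} : came.get? n = some none → PvChain came n [n]
  | step {n m : String} {p : List String} :
      came.get? n = some (some m) → PvChain came m p → PvChain came n (p ++ [n])

theorem pvChain_get?_isSome {came : PySem.Dict String (Option String)} {n : String}
    {p : List String} (h : PvChain came n p) : came.get? n ≠ none := by
  cases h <;> simp_all

theorem pvChain_insert_fresh {came : PySem.Dict String (Option String)} {n k : String}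
    {v : Option String} {p : List String} (hk : came.contains k = false)
    (h : PvChain came n p) : PvChain (came.insert k v) n p := by
  induction h with
  | @base nn hn =>
    apply PvChain.base
    rw [PySem.Dict.get?_insert_of_ne]
    · exact hn
    · intro he; subst he
      have h0 : came.get? nn = none := by
        simpa [PySem.Dict.get?_eq_none_iff_contains] using hk
      simp [h0] at hn
  | @step nn m pp hn _ ih =>
    apply PvChain.step _ ih
    rw [PySem.Dict.get?_insert_of_ne]
    · exact hn
    · intro he; subst he
      have h0 : came.get? nn = none := by
        simpa [PySem.Dict.get?_eq_none_iff_contains] using hk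
      simp [h0] at hn

theorem pvRecon_chain {came : PySem.Dict String (Option String)} {n : String}
    {p : List String} (h : PvChain came n p) :
    ∀ fuel acc, p.length ≤ fuel + 1 → pvRecon came (fuel + 1) (some n) acc = p ++ acc.reverse := by
  induction h with
  | @base nn hn =>
    intro fuel acc _
    have hd : came.getD nn none = none := by
      simp [PySem.Dict.getD_eq_get?_getD, hn]
    simp [pvRecon, hd]
  | @step nn m pp hn hc ih =>
    intro fuel acc hlen
    have hd : came.getD nn none = some m := by
      simp [PySem.Dict.getD_eq_get?_getD, hn]
    have hp : 1 ≤ pp.length := by cases hc <;> simp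
    have hlen' : pp.length + 1 ≤ fuel + 1 := by simpa using hlen
    obtain ⟨f, rfl⟩ : ∃ f, fuel = f + 1 := by
      cases fuel
      · omega
      · exact ⟨_, rfl⟩
    rw [pvRecon, hd, ih f (acc ++ [nn]) (by omega)]
    simp

-- relation between an A-queue entry and a B-queue entry
def PvRel (came : PySem.Dict String (Option String)) (depth : PySem.Dict String Int)
    (a : String × List String) (b : String) : Prop :=
  a.1 = b ∧ PvChain came b a.2 ∧ a.2.length ≤ came.size ∧ (a.2.length : Int) = depth.getD b 0

theorem pvReconstruct_eq {came : PySem.Dict String (Option String)} {n : String}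
    {p : List String} (h : PvChain came n p) (hb : p.length ≤ came.size) :
    pvReconstruct came n = p := by
  have := pvRecon_chain h came.size [] (by omega)
  simpa [pvReconstruct] using this

theorem pvChain_contains {came : PySem.Dict String (Option String)} {n : String}
    {p : List String} (h : PvChain came n p) : came.contains n = true := by
  have := pvChain_get?_isSome h
  by_contra hc
  exact this ((PySem.Dict.get?_eq_none_iff_contains _ _).2 (by simpa using hc))

theorem pvForall2_append {α β : Type} {R : α → β → Prop} {l₁ u₁ : List α} {l₂ u₂ : List β}
    (h : List.Forall₂ R l₁ l₂) (h' : List.Forall₂ R u₁ u₂) :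
    List.Forall₂ R (l₁ ++ u₁) (l₂ ++ u₂) := by
  induction h with
  | nil => simpa using h'
  | cons hr _ ih => exact List.Forall₂.cons hr ih

theorem pvRel_mono {came : PySem.Dict String (Option String)} {depth : PySem.Dict String Int}
    {k : String} {v : Option String} {w : Int} (hk : came.contains k = false)
    {a : String × List String} {b : String} (h : PvRel came depth a b) :
    PvRel (came.insert k v) (depth.insert k w) a b := by
  obtain ⟨h1, h2, h3, h4⟩ := h
  have hne : b ≠ k := by
    intro he; subst he; rw [pvChain_contains h2] at hk; exact absurd hk (by simp)
  refine ⟨h1, pvChain_insert_fresh hk h2, ?_, ?_⟩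
  · have : came.size ≤ (came.insert k v).size := by
      simp [PySem.Dict.size_insert, hk]
    omega
  · simp [PySem.Dict.getD_insert, hne]
    exact h4

-- one expansion step preserves the simulation
theorem pvExpand_eq (goal node : String) (ps : List String) :
    ∀ (seen : PySem.Set String) (came : PySem.Dict String (Option String))
      (depth : PySem.Dict String Int) (path : List String)
      (accA : List (String × List String)) (accB : List String),
    seen = came.keys →
    PvChain came node path → path.length ≤ came.size →
    (path.length : Int) = depth.getD node 0 →
    List.Forall₂ (PvRel came depth) accA accB →
    (∃ r, pvExpandA goal ps seen path accA = .inr r ∧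
          pvExpandB goal ps came depth node accB = .inr r) ∨
    (∃ seen' came' depth' accA' accB',
      pvExpandA goal ps seen path accA = .inl (seen', accA') ∧
      pvExpandB goal ps came depth node accB = .inl (came', depth', accB') ∧
      seen' = came'.keys ∧
      PvChain came' node path ∧ path.length ≤ came'.size ∧
      (path.length : Int) = depth'.getD node 0 ∧
      (∀ a b, PvRel came depth a b → PvRel came' depth' a b) ∧
      List.Forall₂ (PvRel came' depth') accA' accB') := by
  induction ps with
  | nil =>
    intro seen came depth path accA accB hseen hch hb hd hacc
    right
    exact ⟨seen, came, depth, accA, accB, rfl, rfl, hseen, hch, hb, hd, fun _ _ h => h, hacc⟩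
  | cons p rest ih =>
    intro seen came depth path accA accB hseen hch hb hd hacc
    have hcond : PySem.Set.contains seen p = came.contains p := by
      rw [hseen, PySem.Dict.contains_eq_decide_mem_keys]
      simp
    by_cases hmem : came.contains p = true
    · simp only [pvExpandA, pvExpandB, hcond, hmem, if_pos]
      exact ih seen came depth path accA accB hseen hch hb hd hacc
    · have hmem' : came.contains p = false := by simpa using hmem
      have hne : p ≠ node := by
        intro he; subst he; rw [pvChain_contains hch] at hmem'; exact absurd hmem' (by simp)
      have hpseen : p ∉ seen := by
        rw [hseen]; intro hin
        rw [PySem.Dict.contains_eq_decide_mem_keys] at hmem'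
        simp [hin] at hmem'
      have hsz : (came.insert p (some node)).size = came.size + 1 := by
        simp [PySem.Dict.size_insert, hmem']
      have hch' : PvChain (came.insert p (some node)) node path :=
        pvChain_insert_fresh hmem' hch
      have hchp : PvChain (came.insert p (some node)) p (path ++ [p]) :=
        PvChain.step (PySem.Dict.get?_insert_self _ _ _) hch'
      simp only [pvExpandA, pvExpandB, hcond, hmem', Bool.false_eq_true, if_false,
        PySem.Set.add_of_not_mem hpseen]
      by_cases hg : p = goal
      · left
        refine ⟨path ++ [p], by rw [if_pos hg], ?_⟩
        rw [if_pos hg,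
          pvReconstruct_eq hchp (by rw [hsz]; simpa using Nat.add_le_add_right hb 1)]
      · rw [if_neg hg, if_neg hg]
        have h1 : seen ++ [p] = (came.insert p (some node)).keys := by
          rw [PySem.Dict.keys_insert_of_not_contains came _ hmem', hseen]
        have hd' : (path.length : Int)
            = (depth.insert p (depth.getD node 0 + 1)).getD node 0 := by
          rw [show (depth.insert p (depth.getD node 0 + 1)).getD node 0
              = depth.getD node 0 by simp [PySem.Dict.getD_insert, Ne.symm hne]]
          exact hd
        have hacc' : List.Forall₂
            (PvRel (came.insert p (some node)) (depth.insert p (depth.getD node 0 + 1)))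
            (accA ++ [(p, path ++ [p])]) (accB ++ [p]) := by
          refine pvForall2_append (hacc.imp (fun _ _ h => pvRel_mono hmem' h)) ?_
          refine List.Forall₂.cons ⟨rfl, hchp, ?_, ?_⟩ List.Forall₂.nil
          · simp only [hsz, List.length_append, List.length_cons, List.length_nil]
            omega
          · simp only [PySem.Dict.getD_insert_self, List.length_append, List.length_cons,
              List.length_nil, ← hd]
            push_cast
            ring
        rcases ih _ _ _ _ _ _ h1 hch' (by omega) hd' hacc' with
          ⟨r, ha, hbq⟩ | ⟨s', c', d', aA', aB', e1, e2, e3, e4, e5, e6, tr, f2⟩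
        · exact Or.inl ⟨r, ha, hbq⟩
        · exact Or.inr ⟨s', c', d', aA', aB', e1, e2, e3, e4, e5, e6,
            fun a b h => tr a b (pvRel_mono hmem' h), f2⟩

-- the two while-loops agree under the simulation relation
theorem pvLoop_eq (goal : String) (parents : PySem.Dict String (List String)) (max_len : Int) :
    ∀ (fuel : Nat) (qA : List (String × List String)) (qB : List String)
      (seen : PySem.Set String) (came : PySem.Dict String (Option String))
      (depth : PySem.Dict String Int),
    seen = came.keys →
    List.Forall₂ (PvRel came depth) qA qB →
    pvLoopA goal parents max_len fuel qA seen = pvLoopB goal parents max_len fuel qB came depth := by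
  intro fuel
  induction fuel with
  | zero =>
    intro qA qB seen came depth hseen hf
    cases hf with
    | nil => simp [pvLoopA, pvLoopB]
    | cons hr ht =>
      rename_i a b qA' qB'
      obtain ⟨node, path⟩ := a
      simp [pvLoopA, pvLoopB]
  | succ fuel ih =>
    intro qA qB seen came depth hseen hf
    cases hf with
    | nil => simp [pvLoopA, pvLoopB]
    | cons hr ht =>
      rename_i a b qA' qB'
      obtain ⟨node, path⟩ := a
      obtain ⟨heq, hch, hb, hd⟩ := hr
      dsimp only at heq
      subst heq
      simp only [pvLoopA, pvLoopB]
      by_cases hg : node = goal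
      · rw [if_pos hg, if_pos hg, pvReconstruct_eq hch hb]
      · rw [if_neg hg, if_neg hg, ← hd]
        by_cases hlen : (path.length : Int) > max_len
        · rw [if_pos hlen, if_pos hlen]
          exact ih qA' qB' seen came depth hseen ht
        · rw [if_neg hlen, if_neg hlen]
          rcases pvExpand_eq goal node (parents.getD node []) seen came depth path [] []
              hseen hch hb hd List.Forall₂.nil with
            ⟨r, e1, e2⟩ | ⟨s', c', d', aA', aB', e1, e2, e3, e4, e5, e6, tr, f2⟩
          · rw [e1, e2]
          · rw [e1, e2]
            exact ih _ _ _ _ _ e3 (pvForall2_append (ht.imp (fun _ _ h => tr _ _ h)) f2)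

-- ===== VERDICT (by name: the statement is the Claim_ definition above) =====
theorem shortest_path_up_spec : Claim_equal_shortest_path_up := by
  intro start goal parents max_len _
  unfold Spec_shortest_path_up shortest_path_up shortest_path_up_alt
  apply pvLoop_eq
  · rfl
  · refine List.Forall₂.cons ⟨rfl, ?_, ?_, ?_⟩ List.Forall₂.nil
    · exact PvChain.base (by simp)
    · simp [PySem.Dict.size_insert]
    · simp
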